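-- pv_equiv track=rewrite | github.com/ablab/HORmon | HORmon/hormon_extract_hors.py | collapse_hor_name
-- ===== SOURCE A (Python) =====
-- def collapse_hor_name(mono_seq, mono_mp, hor):
--     mono_lst = mono_seq.split(",")
--     if len(mono_lst) == 1:
--        return mono_lst[0]
--        rev = "'" if mono_lst[0].endswith("'") else ""
--        if mono_lst[0][1] in "0123456789X":
--            return mono_lst[0][0] + rev
--        else:
--            return mono_lst[0][:2] + rev
--     res = ""
--     start, end = mono_mp[mono_lst[0]], mono_mp[mono_lst[0]]
--     for i in range(1, len(mono_lst)):
--         if mono_mp[mono_lst[i-1]] + 1 == mono_mp[mono_lst[i]]: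
--            end = mono_mp[mono_lst[i]]
--         else:
--            if end >= start or (start < 0 and end <= start):
--               res += str(start) + "-" + str(end) + ","
--            else:
--               res += str(start) + ","
--            start, end = mono_mp[mono_lst[i]], mono_mp[mono_lst[i]]
--     if end >= start or (start < 0 and end <= start):
--         res += str(start) + "-" + str(end)
--     else:
--         res += str(start)
--     if len(mono_lst) == hor[1]:
--         if start < 0:
--             num = "-" + res[1:].split("-")[0]
--         else:
--             num = res.split("-")[0]
--         return "c" + str(hor[2]) + "<sub>" + num + "</sub>"
--     else:
--         s, e = res.split("-")[0], res.split("-")[-1]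
--         if start < 0:
--             s = "-" + res[1:].split("-")[0]
--         if end < 0:
--             e = "-" + res.split("-")[-1]
--         return "p<sub>" + s + "-" + e + "</sub>"
-- ===== SOURCE B (Python) =====
-- def collapse_hor_name(mono_seq, mono_mp, hor):
--     mono_lst = mono_seq.split(",")
--     if len(mono_lst) == 1:
--         return mono_lst[0]
--     vals = [mono_mp[m] for m in mono_lst]
--     if len(mono_lst) == hor[1]:
--         return "c" + str(hor[2]) + "<sub>" + str(vals[0]) + "</sub>"
--     return "p<sub>" + str(vals[0]) + "-" + str(vals[-1]) + "</sub>"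
-- ===== Notes on version B (the rewrite author's own statement) =====
-- stated objective: simpler
-- what changed: B drops A's run-collapsing loop, the rendered 'res' string and its split('-') re-parsing (with the manual negative-sign fix-ups) and reads the two needed numbers directly: the first value of the sequence and, for the 'p' form, the last value, which are by construction the first run's start and the last run's end.
-- intended difference: On multi-element sequences whose first value and last-run start have opposite signs, A's sign fix-up tests the LAST run's start but re-parses the FIRST number from res, so A returns a mangled first bound ('' or a '-'-prefixed truncation, e.g. 'c3<sub></sub>' on the witness) while B returns the intended first value ('c3<sub>-1</sub>'). — e.g. on collapse_hor_name("a,b", [("a", -1), ("b", 5)], (0, 2, 3)): A returns "c3<sub></sub>", B returns "c3<sub>-1</sub>"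
import Mathlib
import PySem

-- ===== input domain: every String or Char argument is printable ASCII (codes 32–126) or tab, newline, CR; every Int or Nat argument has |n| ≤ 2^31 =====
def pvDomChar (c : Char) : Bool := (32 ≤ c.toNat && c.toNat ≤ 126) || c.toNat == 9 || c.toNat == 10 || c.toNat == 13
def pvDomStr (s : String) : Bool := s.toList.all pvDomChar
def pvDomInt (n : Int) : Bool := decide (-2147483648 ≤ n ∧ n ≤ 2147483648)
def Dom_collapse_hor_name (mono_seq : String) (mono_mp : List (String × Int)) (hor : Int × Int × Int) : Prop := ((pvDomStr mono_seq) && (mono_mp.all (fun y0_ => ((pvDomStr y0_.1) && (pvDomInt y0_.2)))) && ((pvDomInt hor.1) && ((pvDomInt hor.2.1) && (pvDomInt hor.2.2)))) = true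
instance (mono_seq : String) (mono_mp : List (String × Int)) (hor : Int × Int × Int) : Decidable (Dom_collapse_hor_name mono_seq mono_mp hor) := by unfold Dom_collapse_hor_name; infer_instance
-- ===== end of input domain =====

-- B replaces A's run-collapsing "res" string and its split('-') re-parsing by reading the first
-- value and the last value of the sequence directly (objective: simpler).

-- shared primitives of the two ports: mono_seq.split(",") and the dict lookup mono_mp[m]
def pvSplitComma (s : String) : List String := (PySem.Str.split? s ",").getD []
def pvLook (mono_mp : List (String × Int)) (m : String) : Int :=
  PySem.Dict.getD (PySem.Dict.mk mono_mp) m 0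

-- ===== PORT A =====
-- (the Python code after `return mono_lst[0]` in the single-element branch is unreachable and is not ported)
def collapse_hor_name (mono_seq : String) (mono_mp : List (String × Int)) (hor : Int × Int × Int) : String :=
  let mono_lst := pvSplitComma mono_seq
  if PySem.List.len mono_lst = 1 then
    PySem.List.pyGetD mono_lst 0 ""
  else
    let st :=
      (PySem.List.pyRange 1 (PySem.List.len mono_lst) 1).foldl
        (fun (st : String × Int × Int) (i : Int) =>
          if pvLook mono_mp (PySem.List.pyGetD mono_lst (i - 1) "") + 1
              = pvLook mono_mp (PySem.List.pyGetD mono_lst i "") then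
            (st.1, st.2.1, pvLook mono_mp (PySem.List.pyGetD mono_lst i ""))
          else
            ((if st.2.2 ≥ st.2.1 ∨ (st.2.1 < 0 ∧ st.2.2 ≤ st.2.1) then
                st.1 ++ PySem.Int.toStr st.2.1 ++ "-" ++ PySem.Int.toStr st.2.2 ++ ","
              else
                st.1 ++ PySem.Int.toStr st.2.1 ++ ","),
              pvLook mono_mp (PySem.List.pyGetD mono_lst i ""),
              pvLook mono_mp (PySem.List.pyGetD mono_lst i "")))
        ("", pvLook mono_mp (PySem.List.pyGetD mono_lst 0 ""),
             pvLook mono_mp (PySem.List.pyGetD mono_lst 0 ""))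
    let res := if st.2.2 ≥ st.2.1 ∨ (st.2.1 < 0 ∧ st.2.2 ≤ st.2.1) then
        st.1 ++ PySem.Int.toStr st.2.1 ++ "-" ++ PySem.Int.toStr st.2.2
      else st.1 ++ PySem.Int.toStr st.2.1
    if PySem.List.len mono_lst = hor.2.1 then
      let num := if st.2.1 < 0 then
          "-" ++ PySem.List.pyGetD ((PySem.Str.split? (PySem.Str.slice res (some 1) none) "-").getD []) 0 ""
        else
          PySem.List.pyGetD ((PySem.Str.split? res "-").getD []) 0 ""
      "c" ++ PySem.Int.toStr hor.2.2 ++ "<sub>" ++ num ++ "</sub>"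
    else
      let s0 := PySem.List.pyGetD ((PySem.Str.split? res "-").getD []) 0 ""
      let e0 := PySem.List.pyGetD ((PySem.Str.split? res "-").getD []) (-1) ""
      let s1 := if st.2.1 < 0 then
          "-" ++ PySem.List.pyGetD ((PySem.Str.split? (PySem.Str.slice res (some 1) none) "-").getD []) 0 ""
        else s0
      let e1 := if st.2.2 < 0 then
          "-" ++ PySem.List.pyGetD ((PySem.Str.split? res "-").getD []) (-1) ""
        else e0
      "p<sub>" ++ s1 ++ "-" ++ e1 ++ "</sub>"

-- ===== PORT B =====
def collapse_hor_name_alt (mono_seq : String) (mono_mp : List (String × Int)) (hor : Int × Int × Int) : String :=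
  let mono_lst := pvSplitComma mono_seq
  if PySem.List.len mono_lst = 1 then
    PySem.List.pyGetD mono_lst 0 ""
  else
    let vals := mono_lst.map (pvLook mono_mp)
    if PySem.List.len mono_lst = hor.2.1 then
      "c" ++ PySem.Int.toStr hor.2.2 ++ "<sub>" ++ PySem.Int.toStr (PySem.List.pyGetD vals 0 0) ++ "</sub>"
    else
      "p<sub>" ++ PySem.Int.toStr (PySem.List.pyGetD vals 0 0) ++ "-"
        ++ PySem.Int.toStr (PySem.List.pyGetD vals (-1) 0) ++ "</sub>"

-- ===== PRECONDITION & SPEC =====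
-- Pre_ excludes exactly the inputs where Python A raises KeyError: a multi-element sequence with
-- an element that is not a key of mono_mp (Python B raises there too).
def Pre_collapse_hor_name (mono_seq : String) (mono_mp : List (String × Int)) (hor : Int × Int × Int) : Prop :=
  let mono_lst := pvSplitComma mono_seq
  mono_lst.length = 1 ∨ ∀ m ∈ mono_lst, PySem.Dict.contains (PySem.Dict.mk mono_mp) m = true
instance (mono_seq : String) (mono_mp : List (String × Int)) (hor : Int × Int × Int) : Decidable (Pre_collapse_hor_name mono_seq mono_mp hor) := by unfold Pre_collapse_hor_name; infer_instance
def pvWitness_collapse_hor_name : String × (List (String × Int)) × (Int × Int × Int) :=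
  ("a,b", [("a", 1), ("b", 2)], (0, 0, 5))

-- start of the LAST maximal consecutive (+1) run of the value sequence (s = current run start, p = previous value)
def pvLastRunStart (s p : Int) : List Int → Int
  | [] => s
  | v :: vs => pvLastRunStart (if p + 1 = v then s else v) v vs

-- On multi-element sequences whose first value and last-run start value have OPPOSITE signs, A's
-- sign fix-up reads the sign of the LAST run's start but re-parses the FIRST number from `res`,
-- so A returns a mangled first bound ('' or a '-'-prefixed truncation), while B returns the
-- intended first value verbatim.
def D_collapse_hor_name (mono_seq : String) (mono_mp : List (String × Int)) (hor : Int × Int × Int) : Prop :=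
  let vals := (pvSplitComma mono_seq).map (pvLook mono_mp)
  ¬(vals.headD 0 < 0 ↔ pvLastRunStart (vals.headD 0) (vals.headD 0) vals.tail < 0)
instance (mono_seq : String) (mono_mp : List (String × Int)) (hor : Int × Int × Int) : Decidable (D_collapse_hor_name mono_seq mono_mp hor) := by unfold D_collapse_hor_name; infer_instance

def Spec_collapse_hor_name (mono_seq : String) (mono_mp : List (String × Int)) (hor : Int × Int × Int) (out : String) : Prop := ¬ D_collapse_hor_name mono_seq mono_mp hor → out = collapse_hor_name_alt mono_seq mono_mp hor
instance (mono_seq : String) (mono_mp : List (String × Int)) (hor : Int × Int × Int) (out : String) : Decidable (Spec_collapse_hor_name mono_seq mono_mp hor out) := by unfold Spec_collapse_hor_name; infer_instance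

def pvDiffWitness_collapse_hor_name : String × (List (String × Int)) × (Int × Int × Int) :=
  ("a,b", [("a", -1), ("b", 5)], (0, 2, 3))
def pvDiffWitnessOut_collapse_hor_name : String × String := ("c3<sub></sub>", "c3<sub>-1</sub>")

-- ===== CLAIM (what is proved, stated in full; the proofs are below) =====
def Claim_unchanged_collapse_hor_name : Prop := ∀ (mono_seq : String) (mono_mp : List (String × Int)) (hor : Int × Int × Int), Dom_collapse_hor_name mono_seq mono_mp hor → Pre_collapse_hor_name mono_seq mono_mp hor → Spec_collapse_hor_name mono_seq mono_mp hor (collapse_hor_name mono_seq mono_mp hor)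
def Claim_changed_collapse_hor_name : Prop := Dom_collapse_hor_name (pvDiffWitness_collapse_hor_name.1) (pvDiffWitness_collapse_hor_name.2.1) (pvDiffWitness_collapse_hor_name.2.2) ∧ Pre_collapse_hor_name (pvDiffWitness_collapse_hor_name.1) (pvDiffWitness_collapse_hor_name.2.1) (pvDiffWitness_collapse_hor_name.2.2) ∧ D_collapse_hor_name (pvDiffWitness_collapse_hor_name.1) (pvDiffWitness_collapse_hor_name.2.1) (pvDiffWitness_collapse_hor_name.2.2) ∧ collapse_hor_name (pvDiffWitness_collapse_hor_name.1) (pvDiffWitness_collapse_hor_name.2.1) (pvDiffWitness_collapse_hor_name.2.2) = pvDiffWitnessOut_collapse_hor_name.1 ∧ collapse_hor_name_alt (pvDiffWitness_collapse_hor_name.1) (pvDiffWitness_collapse_hor_name.2.1) (pvDiffWitness_collapse_hor_name.2.2) = pvDiffWitnessOut_collapse_hor_name.2 ∧ pvDiffWitnessOut_collapse_hor_name.1 ≠ pvDiffWitnessOut_collapse_hor_name.2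
def Claim_exact_collapse_hor_name : Prop := ∀ (mono_seq : String) (mono_mp : List (String × Int)) (hor : Int × Int × Int), Dom_collapse_hor_name mono_seq mono_mp hor → Pre_collapse_hor_name mono_seq mono_mp hor → D_collapse_hor_name mono_seq mono_mp hor → collapse_hor_name mono_seq mono_mp hor ≠ collapse_hor_name_alt mono_seq mono_mp hor

-- ===== LEMMAS AND PROOFS =====

def pvSplit : List Char → List (List Char)
  | [] => [[]]
  | c :: rest =>
    if c = '-' then [] :: pvSplit rest
    else
      match pvSplit rest with
      | [] => [[c]]
      | t :: ts => (c :: t) :: ts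

theorem pvSplit_ne_nil (l : List Char) : pvSplit l ≠ [] := by
  cases l with
  | nil => simp [pvSplit]
  | cons c rest =>
    simp only [pvSplit]
    split
    · simp
    · split <;> simp

theorem pvSplit_go (l : List Char) : ∀ (fuel : Nat) (cur : List Char) (acc : List (List Char)),
    l.length < fuel →
    PySem.Chars.splitOn.go ['-'] fuel l cur acc
      = acc.reverse ++ (pvSplit l).modifyHead (cur.reverse ++ ·) := by
  induction l with
  | nil =>
    intro fuel cur acc h
    match fuel with
    | fuel + 1 => simp [PySem.Chars.splitOn.go, pvSplit]
  | cons c rest ih =>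
    intro fuel cur acc h
    match fuel with
    | fuel + 1 =>
      rw [PySem.Chars.splitOn.go]
      by_cases hc : c = '-'
      · subst hc
        have hpre : List.isPrefixOf ['-'] ('-' :: rest) = true := by simp [List.isPrefixOf]
        rw [if_pos hpre]
        simp only [List.length_singleton, List.drop_succ_cons, List.drop_zero]
        simp only [List.length_cons] at h
        rw [ih fuel [] (cur.reverse :: acc) (by omega)]
        simp [pvSplit]
        show List.modifyHead id _ = _
        rw [List.modifyHead_id]; rfl
      · have hpre : List.isPrefixOf ['-'] (c :: rest) = false := by
          simp [List.isPrefixOf]; exact fun h' => (hc h'.symm).elim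
        rw [if_neg (by simp [hpre])]
        simp only [List.length_cons] at h
        rw [ih fuel (c :: cur) acc (by omega)]
        simp only [pvSplit, if_neg hc]
        congr 1
        rcases hs : pvSplit rest with _ | ⟨t, ts⟩
        · exact absurd hs (pvSplit_ne_nil rest)
        · simp

theorem splitOn_eq_pvSplit (l : List Char) : PySem.Chars.splitOn l ['-'] = pvSplit l := by
  rw [PySem.Chars.splitOn, pvSplit_go l (l.length + 1) [] [] (by omega)]
  simp
  show List.modifyHead id _ = _
  rw [List.modifyHead_id]
  rfl

theorem pvSplit_append (a b : List Char) (ha : '-' ∉ a) :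
    pvSplit (a ++ '-' :: b) = a :: pvSplit b := by
  induction a with
  | nil => simp [pvSplit]
  | cons c a ih =>
    simp only [List.mem_cons, not_or] at ha
    simp only [List.cons_append, pvSplit, ih ha.2]
    rw [if_neg (fun h => ha.1 h.symm)]

theorem pvSplit_no_dash (a : List Char) (ha : '-' ∉ a) : pvSplit a = [a] := by
  induction a with
  | nil => rfl
  | cons c a ih =>
    simp only [List.mem_cons, not_or] at ha
    simp only [pvSplit, ih ha.2]
    rw [if_neg (fun h => ha.1 h.symm)]

theorem pvSplit_last (p b : List Char) (hb : '-' ∉ b) :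
    ∃ ts : List (List Char), ts ≠ [] ∧ pvSplit (p ++ '-' :: b) = ts ++ [b] := by
  induction p with
  | nil => exact ⟨[[]], by simp, by simp [pvSplit, pvSplit_no_dash b hb]⟩
  | cons c p ih =>
    obtain ⟨ts, hne, hts⟩ := ih
    by_cases hc : c = '-'
    · subst hc
      exact ⟨[] :: ts, by simp, by simp [pvSplit, hts]⟩
    · rcases ts with _ | ⟨t, ts⟩
      · exact absurd rfl hne
      · exact ⟨(c :: t) :: ts, by simp, by simp [pvSplit, if_neg hc, hts]⟩

theorem pvToDigits_isDigit (m : Nat) : ∀ c ∈ Nat.toDigits 10 m, c.isDigit = true := by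
  have go : ∀ (fuel n : Nat) (ds : List Char), (∀ c ∈ ds, c.isDigit = true) →
      ∀ c ∈ Nat.toDigitsCore 10 fuel n ds, c.isDigit = true := by
    intro fuel
    induction fuel with
    | zero => intro n ds h; simpa [Nat.toDigitsCore] using h
    | succ fuel ih =>
      intro n ds h c hc
      have hd : (n % 10).digitChar.isDigit = true := by
        have h10 : n % 10 < 10 := Nat.mod_lt _ (by omega)
        have key : ∀ k : Nat, k < 10 → (Nat.digitChar k).isDigit = true := by
          intro k hk; interval_cases k <;> decide
        exact key _ h10
      simp only [Nat.toDigitsCore] at hc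
      by_cases h0 : n / 10 = 0
      · rw [if_pos h0] at hc
        rcases List.mem_cons.mp hc with hc | hc
        · simpa [hc] using hd
        · exact h c hc
      · rw [if_neg h0] at hc
        refine ih (n / 10) _ ?_ c hc
        intro x hx
        rcases List.mem_cons.mp hx with hx | hx
        · simpa [hx] using hd
        · exact h x hx
  exact go (m + 1) m [] (by simp)

theorem pvToDigits_ne_nil (m : Nat) : Nat.toDigits 10 m ≠ [] := by
  have go : ∀ (fuel n : Nat) (ds : List Char), Nat.toDigitsCore 10 (fuel + 1) n ds ≠ [] := by
    intro fuel
    induction fuel with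
    | zero => intro n ds; rw [Nat.toDigitsCore]; split <;> simp [Nat.toDigitsCore]
    | succ fuel ih =>
      intro n ds
      rw [Nat.toDigitsCore]
      split
      · simp
      · exact ih (n / 10) _
  exact go m m []

theorem pvToDigits_no_dash (m : Nat) : '-' ∉ Nat.toDigits 10 m := by
  intro h
  have := pvToDigits_isDigit m _ h
  simp [Char.isDigit] at this

theorem pvToChars_nonneg (n : Int) (h : 0 ≤ n) :
    PySem.Int.toChars n = Nat.toDigits 10 n.natAbs := by
  rw [PySem.Int.toChars, if_neg (by omega)]
  congr 1
  omega

theorem pvToChars_neg (n : Int) (h : n < 0) :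
    PySem.Int.toChars n = '-' :: Nat.toDigits 10 n.natAbs := by
  rw [PySem.Int.toChars, if_pos h]

def pvLoopG {α : Type} (g : α → Int → Int → α) (p : Int) (vs : List Int) (a : α) : α :=
  match vs with
  | [] => a
  | v :: rest => pvLoopG g v rest (g a p v)

theorem pvRangeFold {α : Type} (g : α → Int → Int → α) :
    ∀ (suf pre : List Int) (p : Int) (st : α),
    (PySem.List.pyRange ((pre.length : Int) + 1) ((pre ++ p :: suf).length : Int) 1).foldl
        (fun st i => g st (PySem.List.pyGetD (pre ++ p :: suf) (i - 1) 0)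
                          (PySem.List.pyGetD (pre ++ p :: suf) i 0)) st
      = pvLoopG g p suf st := by
  intro suf
  induction suf with
  | nil =>
    intro pre p st
    rw [PySem.List.pyRange_one_eq_nil (by simp)]
    rfl
  | cons v rest ih =>
    intro pre p st
    rw [PySem.List.pyRange_one_cons (by simp)]
    rw [List.foldl_cons]
    have h1 : PySem.List.pyGetD (pre ++ p :: v :: rest) ((pre.length : Int) + 1 - 1) 0 = p := by
      rw [show ((pre.length : Int) + 1 - 1) = ((pre.length : Nat) : Int) by ring,
        PySem.List.pyGetD_natCast, List.getD_eq_getElem?_getD,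
        List.getElem?_append_right (by omega)]
      simp
    have h2 : PySem.List.pyGetD (pre ++ p :: v :: rest) ((pre.length : Int) + 1) 0 = v := by
      rw [show ((pre.length : Int) + 1) = ((pre.length + 1 : Nat) : Int) by push_cast; ring,
        PySem.List.pyGetD_natCast, List.getD_eq_getElem?_getD,
        List.getElem?_append_right (by omega)]
      simp
    rw [h1, h2]
    have key := ih (pre ++ [p]) v (g st p v)
    have hb : (((pre ++ [p]).length : Nat) : Int) = (pre.length : Int) + 1 := by simp
    rw [hb] at key
    simp only [List.append_assoc, List.cons_append, List.nil_append] at key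
    exact key

def pvRender (s e : Int) : List Int → List Char
  | [] => PySem.Int.toChars s ++ '-' :: PySem.Int.toChars e
  | v :: rest =>
    if e + 1 = v then pvRender s v rest
    else (PySem.Int.toChars s ++ '-' :: PySem.Int.toChars e ++ [',']) ++ pvRender v v rest

theorem pvRender_first (s e : Int) (vs : List Int) :
    ∃ t, pvRender s e vs = PySem.Int.toChars s ++ '-' :: t := by
  induction vs generalizing e with
  | nil => exact ⟨PySem.Int.toChars e, rfl⟩
  | cons v rest ih =>
    by_cases h : e + 1 = v
    · obtain ⟨t, ht⟩ := ih v
      exact ⟨t, by simp [pvRender, if_pos h, ht]⟩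
    · exact ⟨PySem.Int.toChars e ++ [','] ++ pvRender v v rest, by simp [pvRender, if_neg h]⟩

theorem pvRender_last (s e : Int) (vs : List Int) :
    ∃ p, pvRender s e vs = p ++ '-' :: Nat.toDigits 10 (vs.getLastD e).natAbs := by
  induction vs generalizing s e with
  | nil =>
    by_cases he : 0 ≤ e
    · exact ⟨PySem.Int.toChars s, by simp [pvRender, pvToChars_nonneg e he]⟩
    · refine ⟨PySem.Int.toChars s ++ ['-'], ?_⟩
      simp [pvRender, pvToChars_neg e (by omega)]
    -- getLastD [] e = e
  | cons v rest ih =>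
    rw [List.getLastD_cons]
    by_cases h : e + 1 = v
    · obtain ⟨p, hp⟩ := ih s v
      exact ⟨p, by simp [pvRender, if_pos h, hp]⟩
    · obtain ⟨p, hp⟩ := ih v v
      exact ⟨(PySem.Int.toChars s ++ '-' :: PySem.Int.toChars e ++ [',']) ++ p,
        by simp [pvRender, if_neg h, hp]⟩

-- the loop body of port A, as a function of the two looked-up values
def pvG (st : String × Int × Int) (a b : Int) : String × Int × Int :=
  if a + 1 = b then (st.1, st.2.1, b)
  else
    ((if st.2.2 ≥ st.2.1 ∨ (st.2.1 < 0 ∧ st.2.2 ≤ st.2.1) then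
        st.1 ++ PySem.Int.toStr st.2.1 ++ "-" ++ PySem.Int.toStr st.2.2 ++ ","
      else
        st.1 ++ PySem.Int.toStr st.2.1 ++ ","), b, b)

theorem pvLoop_spec (vs : List Int) : ∀ (res : String) (s e : Int), s ≤ e →
    (pvLoopG pvG e vs (res, s, e)).2.1 = pvLastRunStart s e vs
  ∧ (pvLoopG pvG e vs (res, s, e)).2.2 = vs.getLastD e
  ∧ ((if (pvLoopG pvG e vs (res, s, e)).2.2 ≥ (pvLoopG pvG e vs (res, s, e)).2.1
        ∨ ((pvLoopG pvG e vs (res, s, e)).2.1 < 0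
            ∧ (pvLoopG pvG e vs (res, s, e)).2.2 ≤ (pvLoopG pvG e vs (res, s, e)).2.1) then
        (pvLoopG pvG e vs (res, s, e)).1 ++ PySem.Int.toStr (pvLoopG pvG e vs (res, s, e)).2.1
          ++ "-" ++ PySem.Int.toStr (pvLoopG pvG e vs (res, s, e)).2.2
      else
        (pvLoopG pvG e vs (res, s, e)).1 ++ PySem.Int.toStr (pvLoopG pvG e vs (res, s, e)).2.1).toList
      = res.toList ++ pvRender s e vs) := by
  induction vs with
  | nil =>
    intro res s e hse
    refine ⟨rfl, rfl, ?_⟩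
    show (if e ≥ s ∨ (s < 0 ∧ e ≤ s) then res ++ PySem.Int.toStr s ++ "-" ++ PySem.Int.toStr e
          else res ++ PySem.Int.toStr s).toList = _
    rw [if_pos (Or.inl hse)]
    simp [pvRender, String.toList_append, PySem.Int.toList_toStr]
  | cons v rest ih =>
    intro res s e hse
    by_cases h : e + 1 = v
    · have step : pvLoopG pvG e (v :: rest) (res, s, e) = pvLoopG pvG v rest (res, s, v) := by
        show pvLoopG pvG v rest (pvG (res, s, e) e v) = _
        rw [pvG, if_pos h]
      obtain ⟨h1, h2, h3⟩ := ih res s v (by omega)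
      rw [step]
      refine ⟨?_, ?_, ?_⟩
      · rw [h1, pvLastRunStart, if_pos h]
      · rw [h2, List.getLastD_cons]
      · rw [h3]
        rw [show pvRender s e (v :: rest) = pvRender s v rest by rw [pvRender, if_pos h]]
    · have step : pvLoopG pvG e (v :: rest) (res, s, e)
          = pvLoopG pvG v rest (res ++ PySem.Int.toStr s ++ "-" ++ PySem.Int.toStr e ++ ",", v, v) := by
        show pvLoopG pvG v rest (pvG (res, s, e) e v) = _
        rw [pvG, if_neg h, if_pos (Or.inl hse)]
      obtain ⟨h1, h2, h3⟩ := ih (res ++ PySem.Int.toStr s ++ "-" ++ PySem.Int.toStr e ++ ",") v v le_rfl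
      rw [step]
      refine ⟨?_, ?_, ?_⟩
      · rw [h1, pvLastRunStart, if_neg h]
      · rw [h2, List.getLastD_cons]
      · rw [h3]
        rw [show pvRender s e (v :: rest)
            = (PySem.Int.toChars s ++ '-' :: PySem.Int.toChars e ++ [',']) ++ pvRender v v rest
          by rw [pvRender, if_neg h]]
        simp [String.toList_append, PySem.Int.toList_toStr]

-- first-number extraction from res (matching signs)
theorem pvFirstTok (R : String) (s : Int) (t : List Char)
    (hR : R.toList = PySem.Int.toChars s ++ '-' :: t) (hs : 0 ≤ s) :
    PySem.List.pyGetD ((PySem.Str.split? R "-").getD []) 0 "" = PySem.Int.toStr s := by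
  have hnd : '-' ∉ PySem.Int.toChars s := by
    rw [pvToChars_nonneg s hs]; exact pvToDigits_no_dash _
  have : PySem.Chars.splitOn R.toList ['-'] = PySem.Int.toChars s :: pvSplit t := by
    rw [hR, splitOn_eq_pvSplit, pvSplit_append _ _ hnd]
  simp [PySem.Str.split?, PySem.Chars.split?, this, PySem.Int.toStr]

theorem pvFirstTokNeg (R : String) (s : Int) (t : List Char)
    (hR : R.toList = PySem.Int.toChars s ++ '-' :: t) (hs : s < 0) :
    ("-" ++ PySem.List.pyGetD
        ((PySem.Str.split? (PySem.Str.slice R (some 1) none) "-").getD []) 0 "").toList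
      = PySem.Int.toChars s := by
  have hnd : '-' ∉ Nat.toDigits 10 s.natAbs := pvToDigits_no_dash _
  have htail : PySem.List.slice R.toList (some 1) none
      = Nat.toDigits 10 s.natAbs ++ '-' :: t := by
    rw [PySem.List.slice_from_one, hR, pvToChars_neg s hs]
    rfl
  have key : PySem.Chars.splitOn (PySem.List.slice R.toList (some 1) none) ['-']
      = Nat.toDigits 10 s.natAbs :: pvSplit t := by
    rw [htail, splitOn_eq_pvSplit, pvSplit_append _ _ hnd]
  simp [PySem.Str.split?, PySem.Chars.split?, PySem.Str.slice, key, String.toList_append,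
    pvToChars_neg s hs]

theorem pvLastTok (R : String) (p : List Char) (le : Int)
    (hR : R.toList = p ++ '-' :: Nat.toDigits 10 le.natAbs) :
    PySem.List.pyGetD ((PySem.Str.split? R "-").getD []) (-1) ""
      = String.ofList (Nat.toDigits 10 le.natAbs) := by
  obtain ⟨ts, hne, hts⟩ := pvSplit_last p _ (pvToDigits_no_dash le.natAbs)
  have : PySem.Chars.splitOn R.toList ['-'] = ts ++ [Nat.toDigits 10 le.natAbs] := by
    rw [hR, splitOn_eq_pvSplit, hts]
  simp [PySem.Str.split?, PySem.Chars.split?, this, PySem.List.pyGetD_neg_one_append_singleton]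


theorem pvSplitGo_ne_nil (sep : List Char) (fuel : Nat) :
    ∀ (l cur : List Char) (acc : List (List Char)),
    PySem.Chars.splitOn.go sep fuel l cur acc ≠ [] := by
  induction fuel with
  | zero => intro l cur acc; rw [PySem.Chars.splitOn.go]; simp
  | succ f ih =>
    intro l cur acc
    cases l with
    | nil => rw [PySem.Chars.splitOn.go]; simp; omega
    | cons c rest =>
      rw [PySem.Chars.splitOn.go]
      split
      · exact ih _ _ _
      · exact ih _ _ _

theorem pvSplitStr_ne_nil (s : String) : pvSplitComma s ≠ [] := by
  simp [pvSplitComma, PySem.Str.split?, PySem.Chars.split?, PySem.Chars.splitOn]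
  intro h
  exact absurd h (by simpa using pvSplitGo_ne_nil [','] (s.toList.length + 1) s.toList [] [])

theorem main_unchanged (mono_seq : String) (mono_mp : List (String × Int)) (hor : Int × Int × Int)
    (hpre : Pre_collapse_hor_name mono_seq mono_mp hor)
    (hnd : ¬ D_collapse_hor_name mono_seq mono_mp hor) :
    collapse_hor_name mono_seq mono_mp hor = collapse_hor_name_alt mono_seq mono_mp hor := by
  unfold Pre_collapse_hor_name at hpre
  unfold D_collapse_hor_name at hnd
  rw [collapse_hor_name, collapse_hor_name_alt]
  by_cases hl1 : PySem.List.len (pvSplitComma mono_seq) = 1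
  · rw [if_pos hl1, if_pos hl1]
  · rw [if_neg hl1, if_neg hl1]
    have hne : pvSplitComma mono_seq ≠ [] := pvSplitStr_ne_nil mono_seq
    set lst := pvSplitComma mono_seq with hlst
    clear_value lst
    simp only [PySem.List.len_eq] at hl1
    rcases lst with _ | ⟨m0, mrest⟩
    · exact absurd rfl hne
    rcases mrest with _ | ⟨m1, mrest⟩
    · exact absurd (by simp) hl1
    clear hne hlst
    set f := pvLook mono_mp with hf
    -- the value list
    set L : List String := m0 :: m1 :: mrest with hL
    have hlenL : L.length = mrest.length + 2 := by simp [hL]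
    -- rewrite dict lookups through the value list
    have hcov : ∀ (i : Int), 0 ≤ i → i < (L.length : Int) →
        f (PySem.List.pyGetD L i "")
          = PySem.List.pyGetD (L.map f) i 0 := by
      intro i h0 hi
      rw [PySem.List.pyGetD_eq_getElem L "" h0 (by simpa using hi),
        PySem.List.pyGetD_eq_getElem (L.map f) 0 h0 (by simpa using hi)]
      simp [hf]
    have hv0 : f (PySem.List.pyGetD L 0 "") = f m0 := by
      rw [hcov 0 le_rfl (by simp [hL]; omega)]
      simp [hL, PySem.List.pyGetD_zero_cons]
    -- the A loop as a structural fold over the values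
    have hfold :
        (PySem.List.pyRange 1 (PySem.List.len L) 1).foldl
          (fun (st : String × Int × Int) (i : Int) =>
            if f (PySem.List.pyGetD L (i - 1) "") + 1
                = f (PySem.List.pyGetD L i "") then
              (st.1, st.2.1, f (PySem.List.pyGetD L i ""))
            else
              ((if st.2.2 ≥ st.2.1 ∨ (st.2.1 < 0 ∧ st.2.2 ≤ st.2.1) then
                  st.1 ++ PySem.Int.toStr st.2.1 ++ "-" ++ PySem.Int.toStr st.2.2 ++ ","
                else
                  st.1 ++ PySem.Int.toStr st.2.1 ++ ","),
                f (PySem.List.pyGetD L i ""),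
                f (PySem.List.pyGetD L i "")))
          ("", f m0, f m0)
        = pvLoopG pvG (f m0) ((m1 :: mrest).map f) ("", f m0, f m0) := by
      have hcong := PySem.List.foldl_congr_mem
        (l := PySem.List.pyRange 1 (PySem.List.len L) 1)
        (init := (("", f m0, f m0) : String × Int × Int))
        (f := fun (st : String × Int × Int) (i : Int) =>
          if f (PySem.List.pyGetD L (i - 1) "") + 1
              = f (PySem.List.pyGetD L i "") then
            (st.1, st.2.1, f (PySem.List.pyGetD L i ""))
          else
            ((if st.2.2 ≥ st.2.1 ∨ (st.2.1 < 0 ∧ st.2.2 ≤ st.2.1) then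
                st.1 ++ PySem.Int.toStr st.2.1 ++ "-" ++ PySem.Int.toStr st.2.2 ++ ","
              else
                st.1 ++ PySem.Int.toStr st.2.1 ++ ","),
              f (PySem.List.pyGetD L i ""),
              f (PySem.List.pyGetD L i "")))
        (g := fun (st : String × Int × Int) (i : Int) =>
          pvG st (PySem.List.pyGetD (L.map f) (i - 1) 0) (PySem.List.pyGetD (L.map f) i 0))
        ?_
      · rw [hcong]
        have R := pvRangeFold pvG ((m1 :: mrest).map f) [] (f m0) (("", f m0, f m0) : String × Int × Int)
        simp only [List.nil_append, List.length_nil, Nat.cast_zero, zero_add] at R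
        have hLmap : L.map f = f m0 :: (m1 :: mrest).map f := by simp [hL]
        rw [PySem.List.len_eq]
        rw [show ((L.length : Nat) : Int) = (((f m0 :: (m1 :: mrest).map f).length : Nat) : Int) by
          simp [hL]]
        rw [hLmap]
        exact R
      · intro acc i hi
        beta_reduce
        rw [PySem.List.mem_pyRange_one] at hi
        simp only [PySem.List.len_eq] at hi
        have h1 : 0 ≤ i - 1 := by omega
        have h2 : i - 1 < (L.length : Int) := by omega
        rw [hcov (i - 1) h1 h2, hcov i (by omega) (by omega)]
        rfl
    rw [hv0, hfold]
    obtain ⟨h1, h2, h3⟩ := pvLoop_spec ((m1 :: mrest).map f) "" (f m0) (f m0) le_rfl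
    simp only [String.toList_empty, List.nil_append] at h3
    -- sign agreement from ¬D_
    have hsign : (f m0 < 0) ↔ (pvLastRunStart (f m0) (f m0) ((m1 :: mrest).map f) < 0) := by
      by_contra h'
      exact hnd (by simpa using h')
    -- first and last values of B
    have hB0 : PySem.List.pyGetD (List.map f L) 0 0 = f m0 := by
      simp [hL, PySem.List.pyGetD_zero_cons]
    have hBlast : PySem.List.pyGetD (List.map f L) (-1) 0 = ((m1 :: mrest).map f).getLastD (f m0) := by
      rw [show List.map f L = f m0 :: (m1 :: mrest).map f by simp [hL]]
      rw [PySem.List.pyGetD_neg_one _ 0 (by simp)]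
      exact List.getLast_eq_getLastD _
    obtain ⟨t, ht⟩ := pvRender_first (f m0) (f m0) ((m1 :: mrest).map f)
    obtain ⟨pp, hpp⟩ := pvRender_last (f m0) (f m0) ((m1 :: mrest).map f)
    simp only [PySem.List.len_eq]
    set ST := pvLoopG pvG (f m0) (List.map f (m1 :: mrest)) ("", f m0, f m0) with hST
    set R := (if ST.2.2 ≥ ST.2.1 ∨ ST.2.1 < 0 ∧ ST.2.2 ≤ ST.2.1 then
        ST.1 ++ PySem.Int.toStr ST.2.1 ++ "-" ++ PySem.Int.toStr ST.2.2
      else ST.1 ++ PySem.Int.toStr ST.2.1) with hRdef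
    have hres : R.toList = pvRender (f m0) (f m0) ((m1 :: mrest).map f) := h3
    have hresF : R.toList = PySem.Int.toChars (f m0) ++ '-' :: t := by rw [hres, ht]
    have hresL : R.toList = pp ++ '-' :: Nat.toDigits 10 (((m1 :: mrest).map f).getLastD (f m0)).natAbs := by
      rw [hres, hpp]
    rw [h1, h2]
    by_cases hhor : ((L.length : Nat) : Int) = hor.2.1
    · rw [if_pos hhor, if_pos hhor]
      by_cases hls : pvLastRunStart (f m0) (f m0) ((m1 :: mrest).map f) < 0
      · rw [if_pos hls]
        have hv0n : f m0 < 0 := hsign.mpr hls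
        have hnum := pvFirstTokNeg R (f m0) t hresF hv0n
        rw [← String.toList_inj]
        simp only [String.toList_append, hnum, hB0, PySem.Int.toList_toStr]
      · rw [if_neg hls]
        have hv0n : 0 ≤ f m0 := by by_contra h'; exact hls (hsign.mp (by omega))
        rw [pvFirstTok R (f m0) t hresF hv0n, hB0]
    · rw [if_neg hhor, if_neg hhor]
      have hlast := pvLastTok R pp (((m1 :: mrest).map f).getLastD (f m0)) hresL
      have he1 : (if ((m1 :: mrest).map f).getLastD (f m0) < 0 then
            "-" ++ PySem.List.pyGetD ((PySem.Str.split? R "-").getD []) (-1) ""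
          else PySem.List.pyGetD ((PySem.Str.split? R "-").getD []) (-1) "").toList
          = PySem.Int.toChars (((m1 :: mrest).map f).getLastD (f m0)) := by
        by_cases hle : ((m1 :: mrest).map f).getLastD (f m0) < 0
        · rw [if_pos hle, pvToChars_neg _ hle]
          simp [String.toList_append, hlast]
        · rw [if_neg hle, pvToChars_nonneg _ (by omega), hlast]
          simp
      by_cases hls : pvLastRunStart (f m0) (f m0) ((m1 :: mrest).map f) < 0
      · rw [if_pos hls]
        have hv0n : f m0 < 0 := hsign.mpr hls
        have hnum := pvFirstTokNeg R (f m0) t hresF hv0n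
        rw [← String.toList_inj]
        simp only [String.toList_append, hnum, hB0, hBlast, PySem.Int.toList_toStr]
        rw [← he1]
      · rw [if_neg hls]
        have hv0n : 0 ≤ f m0 := by by_contra h'; exact hls (hsign.mp (by omega))
        rw [pvFirstTok R (f m0) t hresF hv0n, hB0]
        rw [← String.toList_inj]
        simp only [String.toList_append, hBlast, PySem.Int.toList_toStr]
        rw [← he1]

theorem pvFirstTokGen (R : String) (a t : List Char) (hR : R.toList = a ++ '-' :: t)
    (ha : '-' ∉ a) :
    PySem.List.pyGetD ((PySem.Str.split? R "-").getD []) 0 "" = String.ofList a := by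
  have : PySem.Chars.splitOn R.toList ['-'] = a :: pvSplit t := by
    rw [hR, splitOn_eq_pvSplit, pvSplit_append _ _ ha]
  simp [PySem.Str.split?, PySem.Chars.split?, this]

theorem pvFirstTokTailGen (R : String) (c : Char) (a t : List Char)
    (hR : R.toList = c :: (a ++ '-' :: t)) (ha : '-' ∉ a) :
    PySem.List.pyGetD ((PySem.Str.split? (PySem.Str.slice R (some 1) none) "-").getD []) 0 ""
      = String.ofList a := by
  have htail : PySem.List.slice R.toList (some 1) none = a ++ '-' :: t := by
    rw [PySem.List.slice_from_one, hR]
    rfl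
  have key : PySem.Chars.splitOn (PySem.List.slice R.toList (some 1) none) ['-']
      = a :: pvSplit t := by
    rw [htail, splitOn_eq_pvSplit, pvSplit_append _ _ ha]
  simp [PySem.Str.split?, PySem.Chars.split?, PySem.Str.slice, key]

theorem main_tight (mono_seq : String) (mono_mp : List (String × Int)) (hor : Int × Int × Int)
    (_hpre : Pre_collapse_hor_name mono_seq mono_mp hor)
    (hD : D_collapse_hor_name mono_seq mono_mp hor) :
    collapse_hor_name mono_seq mono_mp hor ≠ collapse_hor_name_alt mono_seq mono_mp hor := by
  unfold D_collapse_hor_name at hD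
  rw [collapse_hor_name, collapse_hor_name_alt]
  by_cases hl1 : PySem.List.len (pvSplitComma mono_seq) = 1
  · exfalso
    have hne := pvSplitStr_ne_nil mono_seq
    set lst := pvSplitComma mono_seq with hlst
    clear_value lst
    simp only [PySem.List.len_eq] at hl1
    rcases lst with _ | ⟨m0, rest⟩
    · exact hne rfl
    rcases rest with _ | ⟨m1, rest⟩
    · simp [pvLastRunStart] at hD
    · simp only [List.length_cons] at hl1
      omega
  · rw [if_neg hl1, if_neg hl1]
    have hne : pvSplitComma mono_seq ≠ [] := pvSplitStr_ne_nil mono_seq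
    set lst := pvSplitComma mono_seq with hlst
    clear_value lst
    simp only [PySem.List.len_eq] at hl1
    rcases lst with _ | ⟨m0, mrest⟩
    · exact absurd rfl hne
    rcases mrest with _ | ⟨m1, mrest⟩
    · exact absurd (by simp) hl1
    clear hne hlst
    set f := pvLook mono_mp with hf
    set L : List String := m0 :: m1 :: mrest with hL
    have hcov : ∀ (i : Int), 0 ≤ i → i < (L.length : Int) →
        f (PySem.List.pyGetD L i "")
          = PySem.List.pyGetD (L.map f) i 0 := by
      intro i h0 hi
      rw [PySem.List.pyGetD_eq_getElem L "" h0 (by simpa using hi),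
        PySem.List.pyGetD_eq_getElem (L.map f) 0 h0 (by simpa using hi)]
      simp [hf]
    have hv0 : f (PySem.List.pyGetD L 0 "") = f m0 := by
      rw [hcov 0 le_rfl (by simp [hL]; omega)]
      simp [hL, PySem.List.pyGetD_zero_cons]
    have hfold :
        (PySem.List.pyRange 1 (PySem.List.len L) 1).foldl
          (fun (st : String × Int × Int) (i : Int) =>
            if f (PySem.List.pyGetD L (i - 1) "") + 1
                = f (PySem.List.pyGetD L i "") then
              (st.1, st.2.1, f (PySem.List.pyGetD L i ""))
            else
              ((if st.2.2 ≥ st.2.1 ∨ (st.2.1 < 0 ∧ st.2.2 ≤ st.2.1) then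
                  st.1 ++ PySem.Int.toStr st.2.1 ++ "-" ++ PySem.Int.toStr st.2.2 ++ ","
                else
                  st.1 ++ PySem.Int.toStr st.2.1 ++ ","),
                f (PySem.List.pyGetD L i ""),
                f (PySem.List.pyGetD L i "")))
          ("", f m0, f m0)
        = pvLoopG pvG (f m0) ((m1 :: mrest).map f) ("", f m0, f m0) := by
      have hcong := PySem.List.foldl_congr_mem
        (l := PySem.List.pyRange 1 (PySem.List.len L) 1)
        (init := (("", f m0, f m0) : String × Int × Int))
        (f := fun (st : String × Int × Int) (i : Int) =>
          if f (PySem.List.pyGetD L (i - 1) "") + 1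
              = f (PySem.List.pyGetD L i "") then
            (st.1, st.2.1, f (PySem.List.pyGetD L i ""))
          else
            ((if st.2.2 ≥ st.2.1 ∨ (st.2.1 < 0 ∧ st.2.2 ≤ st.2.1) then
                st.1 ++ PySem.Int.toStr st.2.1 ++ "-" ++ PySem.Int.toStr st.2.2 ++ ","
              else
                st.1 ++ PySem.Int.toStr st.2.1 ++ ","),
              f (PySem.List.pyGetD L i ""),
              f (PySem.List.pyGetD L i "")))
        (g := fun (st : String × Int × Int) (i : Int) =>
          pvG st (PySem.List.pyGetD (L.map f) (i - 1) 0) (PySem.List.pyGetD (L.map f) i 0))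
        ?_
      · rw [hcong]
        have R := pvRangeFold pvG ((m1 :: mrest).map f) [] (f m0) (("", f m0, f m0) : String × Int × Int)
        simp only [List.nil_append, List.length_nil, Nat.cast_zero, zero_add] at R
        have hLmap : L.map f = f m0 :: (m1 :: mrest).map f := by simp [hL]
        rw [PySem.List.len_eq]
        rw [show ((L.length : Nat) : Int) = (((f m0 :: (m1 :: mrest).map f).length : Nat) : Int) by
          simp [hL]]
        rw [hLmap]
        exact R
      · intro acc i hi
        beta_reduce
        rw [PySem.List.mem_pyRange_one] at hi
        simp only [PySem.List.len_eq] at hi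
        have h1 : 0 ≤ i - 1 := by omega
        have h2 : i - 1 < (L.length : Int) := by omega
        rw [hcov (i - 1) h1 h2, hcov i (by omega) (by omega)]
        rfl
    rw [hv0, hfold]
    obtain ⟨h1, h2, h3⟩ := pvLoop_spec ((m1 :: mrest).map f) "" (f m0) (f m0) le_rfl
    simp only [String.toList_empty, List.nil_append] at h3
    have hmix := hD
    simp only [hL] at hmix
    have hmix' : ¬ (f m0 < 0 ↔ pvLastRunStart (f m0) (f m0) ((m1 :: mrest).map f) < 0) := by
      simpa using hmix
    have hB0 : PySem.List.pyGetD (List.map f L) 0 0 = f m0 := by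
      simp [hL, PySem.List.pyGetD_zero_cons]
    obtain ⟨t, ht⟩ := pvRender_first (f m0) (f m0) ((m1 :: mrest).map f)
    simp only [PySem.List.len_eq]
    set ST := pvLoopG pvG (f m0) (List.map f (m1 :: mrest)) ("", f m0, f m0) with hST
    set R := (if ST.2.2 ≥ ST.2.1 ∨ ST.2.1 < 0 ∧ ST.2.2 ≤ ST.2.1 then
        ST.1 ++ PySem.Int.toStr ST.2.1 ++ "-" ++ PySem.Int.toStr ST.2.2
      else ST.1 ++ PySem.Int.toStr ST.2.1) with hRdef
    have hresF : R.toList = PySem.Int.toChars (f m0) ++ '-' :: t := by rw [h3, ht]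
    rw [h1, h2]
    -- the A-side first bound differs from str(v0) whenever the signs disagree
    have key : ((if pvLastRunStart (f m0) (f m0) ((m1 :: mrest).map f) < 0 then
          "-" ++ PySem.List.pyGetD
            ((PySem.Str.split? (PySem.Str.slice R (some 1) none) "-").getD []) 0 ""
        else PySem.List.pyGetD ((PySem.Str.split? R "-").getD []) 0 "") : String).toList
        ≠ PySem.Int.toChars (f m0) := by
      by_cases hls : pvLastRunStart (f m0) (f m0) ((m1 :: mrest).map f) < 0
      · -- last-run start negative, so first value is nonnegative
        have hv0p : 0 ≤ f m0 := by by_contra h'; exact hmix' (by constructor <;> intro <;> omega)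
        obtain ⟨d0, dr, hdig⟩ : ∃ d0 dr, PySem.Int.toChars (f m0) = d0 :: dr := by
          rcases hdg : PySem.Int.toChars (f m0) with _ | ⟨d0, dr⟩
          · exact absurd (by rwa [pvToChars_nonneg _ hv0p] at hdg) (pvToDigits_ne_nil _)
          · exact ⟨d0, dr, rfl⟩
        have hdr : '-' ∉ dr := by
          intro hmem
          exact pvToDigits_no_dash (f m0).natAbs
            (by rw [← pvToChars_nonneg _ hv0p, hdig]; exact List.mem_cons_of_mem _ hmem)
        have hd0 : d0.isDigit = true := by
          have := pvToDigits_isDigit (f m0).natAbs d0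
            (by rw [← pvToChars_nonneg _ hv0p, hdig]; exact List.mem_cons_self)
          exact this
        rw [if_pos hls, pvFirstTokTailGen R d0 dr t (by rw [hresF, hdig]; simp) hdr]
        intro hEq
        simp only [String.toList_append, String.toList_ofList, hdig] at hEq
        have : '-' = d0 := by
          have := congrArg (fun l => l.headD ' ') hEq
          simpa using this
        rw [← this] at hd0
        simp [Char.isDigit] at hd0
      · -- last-run start nonnegative, so first value is negative
        have hv0n : f m0 < 0 := by by_contra h'; exact hmix' (by constructor <;> intro <;> omega)
        have hchars : R.toList = [] ++ '-' :: (Nat.toDigits 10 (f m0).natAbs ++ '-' :: t) := by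
          rw [hresF, pvToChars_neg _ hv0n]; simp
        rw [if_neg hls, pvFirstTokGen R [] _ hchars (by simp)]
        intro hEq
        simp only [String.toList_ofList, pvToChars_neg _ hv0n] at hEq
        exact absurd hEq.symm (by simp)
    by_cases hhor : ((L.length : Nat) : Int) = hor.2.1
    · rw [if_pos hhor, if_pos hhor]
      intro hEq
      have hEq' := congrArg String.toList hEq
      simp only [String.toList_append, List.append_assoc, hB0, PySem.Int.toList_toStr] at hEq'
      have hEq2 := List.append_cancel_left hEq'
      have hEq3 := List.append_cancel_left hEq2
      have hEq4 := List.append_cancel_left hEq3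
      have hEq5 := List.append_cancel_right hEq4
      exact key hEq5
    · rw [if_neg hhor, if_neg hhor]
      -- the last bound agrees on both sides; peel it off, then the first bound differs
      have hBlast : PySem.List.pyGetD (List.map f L) (-1) 0
          = ((m1 :: mrest).map f).getLastD (f m0) := by
        rw [show List.map f L = f m0 :: (m1 :: mrest).map f by simp [hL]]
        rw [PySem.List.pyGetD_neg_one _ 0 (by simp)]
        exact List.getLast_eq_getLastD _
      obtain ⟨pp, hpp⟩ := pvRender_last (f m0) (f m0) ((m1 :: mrest).map f)
      have hresL : R.toList
          = pp ++ '-' :: Nat.toDigits 10 (((m1 :: mrest).map f).getLastD (f m0)).natAbs := by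
        rw [h3, hpp]
      have hlast := pvLastTok R pp (((m1 :: mrest).map f).getLastD (f m0)) hresL
      have he1 : (if ((m1 :: mrest).map f).getLastD (f m0) < 0 then
            "-" ++ PySem.List.pyGetD ((PySem.Str.split? R "-").getD []) (-1) ""
          else PySem.List.pyGetD ((PySem.Str.split? R "-").getD []) (-1) "").toList
          = PySem.Int.toChars (((m1 :: mrest).map f).getLastD (f m0)) := by
        by_cases hle : ((m1 :: mrest).map f).getLastD (f m0) < 0
        · rw [if_pos hle, pvToChars_neg _ hle]
          simp [String.toList_append, hlast]
        · rw [if_neg hle, pvToChars_nonneg _ (by omega), hlast]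
          simp
      intro hEq
      have hEq' := congrArg String.toList hEq
      simp only [String.toList_append, List.append_assoc, hB0, hBlast,
        PySem.Int.toList_toStr] at hEq'
      rw [show PySem.Int.toChars (((m1 :: mrest).map f).getLastD (f m0))
          = (if ((m1 :: mrest).map f).getLastD (f m0) < 0 then
              "-" ++ PySem.List.pyGetD ((PySem.Str.split? R "-").getD []) (-1) ""
            else PySem.List.pyGetD ((PySem.Str.split? R "-").getD []) (-1) "").toList
        from he1.symm] at hEq'
      have hEq2 := List.append_cancel_left hEq'
      have hEq5 := List.append_cancel_right hEq2
      exact key hEq5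

-- ===== VERDICT (by name: the statement is the Claim_ definition above) =====
theorem collapse_hor_name_spec : Claim_unchanged_collapse_hor_name := by
  intro mono_seq mono_mp hor _hdom hpre
  intro hnd
  exact main_unchanged mono_seq mono_mp hor hpre hnd
theorem collapse_hor_name_changed : Claim_changed_collapse_hor_name := by
  unfold Claim_changed_collapse_hor_name; decide
theorem collapse_hor_name_tight : Claim_exact_collapse_hor_name := by
  intro mono_seq mono_mp hor _hdom hpre hD
  exact main_tight mono_seq mono_mp hor hpre hD
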